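-- pv_equiv track=rewrite | github.com/iRonin/hermes-context-compressor | hermes_context_compressor/pattern_detector.py | collapse_retry_loops
-- ===== SOURCE A (Python) =====
-- from typing import Any, Dict, List, Tuple
--
-- def collapse_retry_loops(
--     messages: List[Dict[str, Any]],
--     loops: List[Tuple[int, int, str]],
-- ) -> List[Dict[str, Any]]:
--     """Collapse detected retry loops into single representative messages."""
--     if not loops:
--         return messages
--
--     result: List[Dict[str, Any]] = []
--     loop_ranges = {start: (end, desc) for start, end, desc in loops}
--
--     i = 0
--     while i < len(messages):
--         if i in loop_ranges:
--             end, desc = loop_ranges[i]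
--             first = messages[i].copy()
--             last = messages[end - 1].copy()
--
--             first_content = first.get("content", "")
--             first["content"] = f"[Retry loop detected: {desc}]\n{first_content}"
--
--             last_content = last.get("content", "")
--             last["content"] = f"[Final result after {desc}]\n{last_content}"
--
--             result.append(first)
--             if end - i > 2:
--                 result.append(last)
--             else:
--                 for msg in messages[i:end]:
--                     result.append(msg.copy())
--             i = end
--         else:
--             result.append(messages[i].copy())
--             i += 1
--
--     return result
-- ===== SOURCE B (Python) =====
-- from typing import Any, Dict, List, Tuple
--
-- def collapse_retry_loops(
--     messages: List[Dict[str, Any]],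
--     loops: List[Tuple[int, int, str]],
-- ) -> List[Dict[str, Any]]:
--     """Collapse detected retry loops into single representative messages.
--
--     Mark-then-sweep: pass 1 builds a per-index action table (first / drop /
--     last / first-plus-self) from the non-overlapping loops; pass 2 is one
--     uniform flatMap over enumerate(messages) consulting the table.
--     """
--     if not loops:
--         return messages
--
--     ranges = {start: (end, desc) for start, end, desc in loops}
--
--     # Pass 1: mark each index touched by an accepted loop with its action.
--     actions: Dict[int, Tuple[str, str]] = {}
--     prev_end = 0
--     for start in sorted(ranges):
--         if start < prev_end or start >= len(messages):
--             continue
--         end, desc = ranges[start]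
--         if end - start > 2:
--             actions[start] = ("first", desc)
--             for j in range(start + 1, end - 1):
--                 actions[j] = ("drop", desc)
--             actions[end - 1] = ("last", desc)
--         else:
--             actions[start] = ("first_and_self", desc)
--         prev_end = end
--
--     # Pass 2: sweep the messages once, expanding each by its action.
--     def emit(i: int, msg: Dict[str, Any]) -> List[Dict[str, Any]]:
--         act = actions.get(i)
--         if act is None:
--             return [msg.copy()]
--         tag, desc = act
--         if tag == "drop":
--             return []
--         if tag == "last":
--             m = msg.copy()
--             m["content"] = f"[Final result after {desc}]\n{m.get('content', '')}"
--             return [m]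
--         m = msg.copy()
--         m["content"] = f"[Retry loop detected: {desc}]\n{m.get('content', '')}"
--         if tag == "first":
--             return [m]
--         return [m, msg.copy()]
--
--     return [out for i, msg in enumerate(messages) for out in emit(i, msg)]
-- ===== Notes on version B (the rewrite author's own statement) =====
-- stated objective: alternative
-- what changed: B is a two-stage mark-then-sweep: pass 1 builds a per-index action table (first / drop / last / first-plus-self) from the accepted non-overlapping loops, pass 2 is one uniform flatMap over enumerate(messages) that expands each message by its table entry, instead of A's fused index scan that jumps i and emits slices inline.
import Mathlib
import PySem

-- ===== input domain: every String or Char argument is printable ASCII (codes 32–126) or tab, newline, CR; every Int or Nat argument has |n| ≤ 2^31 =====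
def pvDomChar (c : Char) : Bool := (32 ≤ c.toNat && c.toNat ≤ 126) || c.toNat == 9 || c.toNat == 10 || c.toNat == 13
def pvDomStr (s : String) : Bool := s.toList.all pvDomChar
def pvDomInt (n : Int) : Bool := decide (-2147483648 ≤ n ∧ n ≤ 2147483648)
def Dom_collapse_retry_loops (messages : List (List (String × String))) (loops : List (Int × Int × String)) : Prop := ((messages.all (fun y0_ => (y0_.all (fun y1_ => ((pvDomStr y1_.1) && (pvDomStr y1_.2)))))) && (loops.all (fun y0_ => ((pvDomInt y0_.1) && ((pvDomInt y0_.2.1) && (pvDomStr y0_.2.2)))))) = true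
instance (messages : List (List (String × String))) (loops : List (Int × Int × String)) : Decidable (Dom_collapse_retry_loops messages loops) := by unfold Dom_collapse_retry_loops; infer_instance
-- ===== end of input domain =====

-- B is a two-stage mark-then-sweep (per-index action table, then one uniform flatMap over
-- enumerate(messages)) instead of A's fused index scan; objective: alternative decomposition
-- (same asymptotic cost). Equivalence is about return values (neither program mutates its arguments).

-- ===== PORT A =====
-- shared message-rewriting steps (identical lines in both Pythons):
-- m.copy(); m["content"] = f"[Retry loop detected: {desc}]\n{m.get('content','')}"
def pvModFirst (m : List (String × String)) (desc : String) : List (String × String) :=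
  ((PySem.Dict.mk m).insert "content"
    ("[Retry loop detected: " ++ desc ++ "]\n" ++ (PySem.Dict.mk m).getD "content" "")).items

-- m.copy(); m["content"] = f"[Final result after {desc}]\n{m.get('content','')}"
def pvModLast (m : List (String × String)) (desc : String) : List (String × String) :=
  ((PySem.Dict.mk m).insert "content"
    ("[Final result after " ++ desc ++ "]\n" ++ (PySem.Dict.mk m).getD "content" "")).items

-- loop_ranges = {start: (end, desc) for start, end, desc in loops}  (built identically in A and B)
def pvRanges (loops : List (Int × Int × String)) : PySem.Dict Int (Int × String) :=
  loops.foldl (fun d t => d.insert t.1 (t.2.1, t.2.2)) PySem.Dict.empty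

-- A's while-loop over the message index i; the fuel only makes the recursion structural: it
-- over-approximates the number of iterations of every terminating run on the stated domain
-- (inside Pre_ at most messages.length iterations happen).
def aLoop (messages : List (List (String × String))) (lr : PySem.Dict Int (Int × String)) :
    Nat → Int → List (List (String × String)) → List (List (String × String))
  | 0, _, result => result
  | fuel + 1, i, result =>
      if i < (messages.length : Int) then
        match lr.get? i with
        | some (e, d) =>
            match PySem.List.pyGet? messages i, PySem.List.pyGet? messages (e - 1) with
            | some fm, some lm =>
                let first := pvModFirst fm d
                let last := pvModLast lm d
                if e - i > 2 then
                  aLoop messages lr fuel e (result ++ [first, last])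
                else
                  aLoop messages lr fuel e (result ++ [first] ++ PySem.List.slice messages (some i) (some e))
            | _, _ => result  -- IndexError in Python (outside Pre_)
        | none =>
            match PySem.List.pyGet? messages i with
            | some m => aLoop messages lr fuel (i + 1) (result ++ [m])
            | none => result  -- IndexError in Python (outside Pre_)
      else result

def collapse_retry_loops (messages : List (List (String × String))) (loops : List (Int × Int × String)) : List (List (String × String)) :=
  if loops.isEmpty then messages
  else aLoop messages (pvRanges loops) ((loops.length + 1) * (messages.length + 2147483650)) 0 []

-- ===== PORT B =====
-- the per-index action tags of Source B: ("first", d) / ("drop", d) / ("last", d) / ("first_and_self", d)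
inductive PvAct : Type
  | first (d : String)
  | drop (d : String)
  | last (d : String)
  | firstSelf (d : String)
deriving DecidableEq, Repr

-- pass 1 of Source B: the for-loop over sorted(ranges) that marks each index of an accepted loop
def bMark (n : Int) (lr : PySem.Dict Int (Int × String)) :
    List Int → Int → PySem.Dict Int PvAct → PySem.Dict Int PvAct
  | [], _, acts => acts
  | s :: ks, prev, acts =>
      if s < prev ∨ n ≤ s then bMark n lr ks prev acts
      else
        match lr.get? s with
        | some (e, d) =>
            if e - s > 2 then
              bMark n lr ks e
                (((PySem.List.pyRange (s + 1) (e - 1) 1).foldl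
                    (fun a j => a.insert j (PvAct.drop d))
                    (acts.insert s (PvAct.first d))).insert (e - 1) (PvAct.last d))
            else bMark n lr ks e (acts.insert s (PvAct.firstSelf d))
        | none => bMark n lr ks prev acts  -- unreachable: s is a key of lr

-- pass 2 of Source B: emit(i, msg), consulting the action table
def pvEmit (acts : PySem.Dict Int PvAct) (i : Int) (msg : List (String × String)) :
    List (List (String × String)) :=
  match acts.get? i with
  | none => [msg]
  | some (PvAct.drop _) => []
  | some (PvAct.last d) => [pvModLast msg d]
  | some (PvAct.first d) => [pvModFirst msg d]
  | some (PvAct.firstSelf d) => [pvModFirst msg d, msg]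

def collapse_retry_loops_alt (messages : List (List (String × String))) (loops : List (Int × Int × String)) : List (List (String × String)) :=
  if loops.isEmpty then messages
  else
    let acts := bMark (messages.length : Int) (pvRanges loops)
      (PySem.List.sorted (pvRanges loops).keys (fun k => k)) 0 PySem.Dict.empty
    (PySem.List.enumerate messages 0).flatMap (fun p => pvEmit acts p.1 p.2)

-- ===== PRECONDITION & SPEC =====
-- Pre_ excludes loop tuples whose start lies in range but whose end is ≤ start or > len(messages):
-- there A diverges (i stops advancing) or raises IndexError / reads messages[end-1] by negative-index
-- wraparound; a few such inputs where the bad loop is shadowed by an earlier collapse still return in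
-- A (see claim.json cites) and are excluded with the rest.
def Pre_collapse_retry_loops (messages : List (List (String × String))) (loops : List (Int × Int × String)) : Prop :=
  ∀ t ∈ loops, (0 ≤ t.1 ∧ t.1 < (messages.length : Int)) → (t.1 < t.2.1 ∧ t.2.1 ≤ (messages.length : Int))
instance (messages : List (List (String × String))) (loops : List (Int × Int × String)) : Decidable (Pre_collapse_retry_loops messages loops) := by unfold Pre_collapse_retry_loops; infer_instance

def pvWitness_collapse_retry_loops : (List (List (String × String))) × (List (Int × Int × String)) :=
  ([[("content", "a")], [("content", "b")], [("content", "c")], [("content", "d")], [("content", "e")]],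
   [(1, 5, "3 retries"), (0, 1, "noop")])

def Spec_collapse_retry_loops (messages : List (List (String × String))) (loops : List (Int × Int × String)) (out : List (List (String × String))) : Prop := out = collapse_retry_loops_alt messages loops
instance (messages : List (List (String × String))) (loops : List (Int × Int × String)) (out : List (List (String × String))) : Decidable (Spec_collapse_retry_loops messages loops out) := by unfold Spec_collapse_retry_loops; infer_instance

-- ===== CLAIM (what is proved, stated in full; the proofs are below) =====
def Claim_equal_collapse_retry_loops : Prop := ∀ (messages : List (List (String × String))) (loops : List (Int × Int × String)), Dom_collapse_retry_loops messages loops → Pre_collapse_retry_loops messages loops → Spec_collapse_retry_loops messages loops (collapse_retry_loops messages loops)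

-- ===== LEMMAS AND PROOFS =====

-- looking up the ranges dict yields a tuple of loops
lemma pv_get_foldl_insert (loops : List (Int × Int × String)) (d0 : PySem.Dict Int (Int × String))
    (s : Int) (v : Int × String)
    (h : (loops.foldl (fun d t => d.insert t.1 (t.2.1, t.2.2)) d0).get? s = some v) :
    (∃ t ∈ loops, t.1 = s ∧ v = (t.2.1, t.2.2)) ∨ d0.get? s = some v := by
  induction loops generalizing d0 with
  | nil => right; simpa using h
  | cons t rest ih =>
    simp only [List.foldl_cons] at h
    rcases ih _ h with h1 | h2
    · obtain ⟨u, hu, h3, h4⟩ := h1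
      exact Or.inl ⟨u, by simp [hu], h3, h4⟩
    · by_cases hs : s = t.1
      · subst hs
        rw [PySem.Dict.get?_insert_self] at h2
        exact Or.inl ⟨t, by simp, rfl, (Option.some.inj h2).symm⟩
      · right; rwa [PySem.Dict.get?_insert_of_ne _ _ hs] at h2

-- a fold of inserts whose keys all differ from j leaves the lookup of j alone
lemma pv_get_foldl_ne (l : List Int) (f : Int → PvAct) (acc : PySem.Dict Int PvAct) (j : Int)
    (h : ∀ k ∈ l, k ≠ j) :
    (l.foldl (fun a k => a.insert k (f k)) acc).get? j = acc.get? j := by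
  induction l generalizing acc with
  | nil => rfl
  | cons k l ih =>
    simp only [List.foldl_cons]
    rw [ih _ (fun x hx => h x (by simp [hx])),
      PySem.Dict.get?_insert_of_ne _ _ (fun hj => h k (by simp) hj.symm)]

-- a fold of inserts over a Nodup list returns the inserted value at a member key
lemma pv_get_foldl_mem (l : List Int) (f : Int → PvAct) :
    ∀ (acc : PySem.Dict Int PvAct) (j : Int), l.Nodup → j ∈ l →
      (l.foldl (fun a k => a.insert k (f k)) acc).get? j = some (f j) := by
  induction l with
  | nil => intro acc j _ hj; simp at hj
  | cons k l ih =>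
    intro acc j hnd hj
    simp only [List.foldl_cons]
    rcases List.mem_cons.mp hj with rfl | hj'
    · rw [pv_get_foldl_ne l f _ j (fun x hx hxj => (List.nodup_cons.mp hnd).1 (hxj ▸ hx)),
        PySem.Dict.get?_insert_self]
    · exact ih _ j (List.nodup_cons.mp hnd).2 hj'

-- bMark never writes at an index below the running prev, nor at a non-key index ≤ prev
lemma pv_bMark_get_low (n : Int) (lr : PySem.Dict Int (Int × String))
    (hP : ∀ s e d, lr.get? s = some (e, d) → 0 ≤ s → s < n → s < e ∧ e ≤ n) :
    ∀ (ks : List Int) (prev : Int) (acc : PySem.Dict Int PvAct) (j : Int),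
      0 ≤ prev → (∀ s ∈ ks, (lr.get? s).isSome) →
      (j < prev ∨ (lr.get? j = none ∧ j ≤ prev)) →
      (bMark n lr ks prev acc).get? j = acc.get? j := by
  intro ks
  induction ks with
  | nil => intro prev acc j _ _ _; rfl
  | cons s ks ih =>
    intro prev acc j h0 hmem hj
    have htail : ∀ x ∈ ks, (lr.get? x).isSome := fun x hx => hmem x (by simp [hx])
    rw [bMark]
    by_cases hskip : s < prev ∨ n ≤ s
    · rw [if_pos hskip]; exact ih prev acc j h0 htail hj
    · rw [if_neg hskip]
      rcases hget : lr.get? s with _ | ⟨e, d⟩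
      · exact ih prev acc j h0 htail hj
      · obtain ⟨hse, hen⟩ := hP s e d hget (by omega) (by omega)
        have hjlt : j < s := by
          rcases hj with h | ⟨hnone, hle⟩
          · omega
          · rcases lt_or_eq_of_le (by omega : j ≤ s) with h2 | h2
            · exact h2
            · exact absurd hget (by rw [← h2, hnone]; simp)
        show PySem.Dict.get? (if e - s > 2 then _ else _) j = acc.get? j
        by_cases h2 : e - s > 2
        · rw [if_pos h2, ih e _ j (by omega) htail (Or.inl (by omega)),
            PySem.Dict.get?_insert_of_ne _ _ (by omega : j ≠ e - 1),
            pv_get_foldl_ne _ _ _ j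
              (fun k hk => by rw [PySem.List.mem_pyRange_one] at hk; omega),
            PySem.Dict.get?_insert_of_ne _ _ (by omega : j ≠ s)]
        · rw [if_neg h2, ih e _ j (by omega) htail (Or.inl (by omega)),
            PySem.Dict.get?_insert_of_ne _ _ (by omega : j ≠ s)]

-- bMark does not care whether prev is i or i+1 when i is no start in ks
lemma pv_bMark_congr (n : Int) (lr : PySem.Dict Int (Int × String)) :
    ∀ (ks : List Int) (i : Int) (acc : PySem.Dict Int PvAct),
      (∀ s ∈ ks, s ≠ i) →
      bMark n lr ks i acc = bMark n lr ks (i + 1) acc := by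
  intro ks
  induction ks with
  | nil => intro i acc _; rfl
  | cons s ks ih =>
    intro i acc h
    have hsi : s ≠ i := h s (by simp)
    have htail : ∀ x ∈ ks, x ≠ i := fun x hx => h x (by simp [hx])
    rw [bMark, bMark]
    by_cases hskip : s < i ∨ n ≤ s
    · rw [if_pos hskip, if_pos (by omega), ih i acc htail]
    · rw [if_neg hskip, if_neg (by rcases lt_or_gt_of_ne hsi with h' | h' <;> omega)]
      rcases hget : lr.get? s with _ | ⟨e, d⟩
      · exact ih i acc htail
      · rfl

-- bMark ignores a prefix of skipped starts
lemma pv_bMark_skip_prefix (n : Int) (lr : PySem.Dict Int (Int × String))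
    (pre ks : List Int) (prev : Int) (acc : PySem.Dict Int PvAct)
    (h : ∀ s ∈ pre, s < prev ∨ n ≤ s) :
    bMark n lr (pre ++ ks) prev acc = bMark n lr ks prev acc := by
  induction pre with
  | nil => rfl
  | cons s pre ih =>
    rw [List.cons_append, bMark, if_pos (h s (by simp))]
    exact ih (fun x hx => h x (by simp [hx]))

-- the sweep of pass 2, written as index recursion (proof-side view of the flatMap)
def pvSweepGo (acts : PySem.Dict Int PvAct) :
    List (List (String × String)) → Int → List (List (String × String))
  | [], _ => []
  | m :: rest, s => pvEmit acts s m ++ pvSweepGo acts rest (s + 1)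

lemma pv_enum_flatMap (acts : PySem.Dict Int PvAct) (xs : List (List (String × String))) :
    ∀ s : Int, (PySem.List.enumerate xs s).flatMap (fun p => pvEmit acts p.1 p.2) = pvSweepGo acts xs s := by
  induction xs with
  | nil => intro s; simp [PySem.List.enumerate_nil, pvSweepGo]
  | cons m rest ih => intro s; rw [PySem.List.enumerate_cons, pvSweepGo, List.flatMap_cons, ih]

lemma pv_sweep_append (acts : PySem.Dict Int PvAct) (xs ys : List (List (String × String))) :
    ∀ s : Int, pvSweepGo acts (xs ++ ys) s = pvSweepGo acts xs s ++ pvSweepGo acts ys (s + xs.length) := by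
  induction xs with
  | nil => intro s; simp [pvSweepGo]
  | cons m rest ih =>
    intro s
    rw [List.cons_append, pvSweepGo, pvSweepGo, ih (s + 1), List.append_assoc]
    congr 3
    simp only [List.length_cons]
    push_cast; ring

lemma pv_sweep_copy (acts : PySem.Dict Int PvAct) (xs : List (List (String × String))) :
    ∀ s : Int, (∀ k : Nat, k < xs.length → acts.get? (s + k) = none) → pvSweepGo acts xs s = xs := by
  induction xs with
  | nil => intro s _; rfl
  | cons m rest ih =>
    intro s h
    rw [pvSweepGo, pvEmit]
    have h0 : acts.get? s = none := by simpa using h 0 (by simp)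
    rw [h0]
    rw [ih (s + 1) (fun k hk => by
      have h1 := h (k + 1) (by simpa using hk)
      rwa [show s + ((k + 1 : Nat) : Int) = s + 1 + (k : Int) by push_cast; ring] at h1)]
    rfl

lemma pv_sweep_drops (acts : PySem.Dict Int PvAct) (xs : List (List (String × String))) :
    ∀ s : Int, (∀ k : Nat, k < xs.length → ∃ d, acts.get? (s + k) = some (PvAct.drop d)) →
      pvSweepGo acts xs s = [] := by
  induction xs with
  | nil => intro s _; rfl
  | cons m rest ih =>
    intro s h
    rw [pvSweepGo, pvEmit]
    obtain ⟨d, h0⟩ := h 0 (by simp)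
    rw [show s + ((0 : Nat) : Int) = s by simp] at h0
    rw [h0]
    rw [ih (s + 1) (fun k hk => by
      obtain ⟨d', h'⟩ := h (k + 1) (by simpa using hk)
      exact ⟨d', by rwa [show s + ((k + 1 : Nat) : Int) = s + 1 + (k : Int) by push_cast; ring] at h'⟩)]
    rfl

-- the main invariant: A's index scan from i equals the table sweep over the remaining suffix
lemma pv_main (messages : List (List (String × String))) (lr : PySem.Dict Int (Int × String))
    (hP : ∀ s e d, lr.get? s = some (e, d) → 0 ≤ s → s < (messages.length : Int) →
          s < e ∧ e ≤ (messages.length : Int)) :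
    ∀ (fuel : Nat) (i : Int) (out : List (List (String × String))) (ks : List Int)
      (acc : PySem.Dict Int PvAct),
      0 ≤ i → (messages.length : Int) ≤ i + fuel →
      ks.Pairwise (· < ·) →
      (∀ s ∈ ks, (lr.get? s).isSome) →
      (∀ s : Int, (lr.get? s).isSome → i ≤ s → s ∈ ks) →
      (∀ j : Int, i ≤ j → acc.get? j = none) →
      aLoop messages lr fuel i out =
        out ++ pvSweepGo (bMark (messages.length : Int) lr ks i acc) (messages.drop i.toNat) i := by
  intro fuel
  induction fuel with
  | zero =>
    intro i out ks acc h0 hlen _ _ _ _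
    rw [aLoop, List.drop_eq_nil_of_le (by omega), pvSweepGo, List.append_nil]
  | succ fuel ih =>
    intro i out ks acc h0 hlen hpw hmem hcov hacc
    rw [aLoop]
    by_cases hi : i < (messages.length : Int)
    · rw [if_pos hi]
      have hdrop : messages.drop i.toNat = messages[i.toNat]'(by omega) :: messages.drop (i.toNat + 1) :=
        List.drop_eq_getElem_cons (by omega)
      rcases hget : lr.get? i with _ | ⟨e, d⟩
      · -- no loop starts here: emit a copy, step to i+1
        have hg : PySem.List.pyGet? messages i = some (messages[i.toNat]'(by omega)) :=
          PySem.List.pyGet?_eq_some_getElem messages h0 hi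
        simp only [hg]
        have hne : ∀ s ∈ ks, s ≠ i := fun s hs hsi => by
          have := hmem s hs; rw [hsi, hget] at this; simp at this
        rw [ih (i + 1) _ ks acc (by omega) (by omega) hpw hmem
          (fun s h1 h2 => hcov s h1 (by omega)) (fun j hj => hacc j (by omega)),
          ← pv_bMark_congr _ lr ks i acc hne]
        rw [hdrop, pvSweepGo, pvEmit,
          pv_bMark_get_low _ lr hP ks i acc i h0 hmem (Or.inr ⟨hget, le_rfl⟩),
          hacc i le_rfl]
        have : (i + 1).toNat = i.toNat + 1 := by omega
        rw [this]
        simp [List.append_assoc]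
      · -- a loop [i, e) starts here
        obtain ⟨hie, hel⟩ := hP i e d hget h0 hi
        have hgf : PySem.List.pyGet? messages i = some (messages[i.toNat]'(by omega)) :=
          PySem.List.pyGet?_eq_some_getElem messages h0 hi
        have hgl : PySem.List.pyGet? messages (e - 1) = some (messages[(e-1).toNat]'(by omega)) :=
          PySem.List.pyGet?_eq_some_getElem messages (by omega) (by omega)
        simp only [hgf, hgl]
        have hik : i ∈ ks := hcov i (by rw [hget]; rfl) le_rfl
        obtain ⟨pre, rest, rfl⟩ := List.append_of_mem hik
        rw [List.pairwise_append] at hpw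
        obtain ⟨hpwpre, hpwc, hcross⟩ := hpw
        rw [List.pairwise_cons] at hpwc
        obtain ⟨hirest, hpwrest⟩ := hpwc
        rw [pv_bMark_skip_prefix _ lr pre (i :: rest) i acc
          (fun s hs => Or.inl (hcross s hs i (by simp)))]
        rw [bMark, if_neg (show ¬ (i < i ∨ (messages.length : Int) ≤ i) by omega)]
        simp only [hget]
        have hmemrest : ∀ s ∈ rest, (lr.get? s).isSome := fun s hs => hmem s (by simp [hs])
        have hcovrest : ∀ s : Int, (lr.get? s).isSome → e ≤ s → s ∈ rest := by
          intro s h1 h2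
          have hsk := hcov s h1 (by omega)
          rcases List.mem_append.mp hsk with h3 | h3
          · exact absurd (hcross s h3 i (by simp)) (by omega)
          · rcases List.mem_cons.mp h3 with h4 | h4
            · omega
            · exact h4
        -- split the suffix at e
        have hdd : (messages.drop i.toNat).drop (e.toNat - i.toNat) = messages.drop e.toNat := by
          rw [List.drop_drop]; congr 1; omega
        have hsplit : messages.drop i.toNat =
            (messages.drop i.toNat).take (e.toNat - i.toNat) ++ messages.drop e.toNat := by
          rw [← hdd, List.take_append_drop]
        have hlenseg : ((messages.drop i.toNat).take (e.toNat - i.toNat)).length = e.toNat - i.toNat := by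
          rw [List.length_take, List.length_drop]; omega
        by_cases h2 : e - i > 2
        · -- long loop
          rw [if_pos h2, if_pos h2]
          set acc' := (((PySem.List.pyRange (i + 1) (e - 1) 1).foldl
              (fun a j => a.insert j (PvAct.drop d))
              (acc.insert i (PvAct.first d))).insert (e - 1) (PvAct.last d)) with hacc'
          have hacc'inv : ∀ j : Int, e ≤ j → acc'.get? j = none := by
            intro j hj
            rw [hacc', PySem.Dict.get?_insert_of_ne _ _ (by omega : j ≠ e - 1),
              pv_get_foldl_ne _ _ _ j (fun k hk => by rw [PySem.List.mem_pyRange_one] at hk; omega),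
              PySem.Dict.get?_insert_of_ne _ _ (by omega : j ≠ i)]
            exact hacc j (by omega)
          have hIH : ∀ o, aLoop messages lr fuel e o =
              o ++ pvSweepGo (bMark (messages.length : Int) lr rest e acc')
                (messages.drop e.toNat) e :=
            fun o => ih e o rest acc' (by omega) (by omega) hpwrest hmemrest hcovrest hacc'inv
          rw [hIH]
          set acts := bMark (messages.length : Int) lr rest e acc' with hacts
          have hlow : ∀ j : Int, j < e → acts.get? j = acc'.get? j := fun j hj =>
            pv_bMark_get_low _ lr hP rest e acc' j (by omega) hmemrest (Or.inl hj)
          -- sweep the [i, e) segment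
          conv_rhs => rw [hsplit]
          rw [pv_sweep_append, hlenseg]
          have hie' : i + ((e.toNat - i.toNat : Nat) : Int) = e := by omega
          rw [hie']
          -- peel the first element of the segment
          have hm : e.toNat - i.toNat = (e.toNat - i.toNat - 1) + 1 := by omega
          have hseg : (messages.drop i.toNat).take (e.toNat - i.toNat) =
              messages[i.toNat]'(by omega) ::
                (messages.drop (i.toNat + 1)).take (e.toNat - i.toNat - 1) := by
            conv_lhs => rw [hdrop, hm]
            rw [List.take_succ_cons]
          rw [hseg, pvSweepGo, pvEmit,
            hlow i (by omega), hacc',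
            PySem.Dict.get?_insert_of_ne _ _ (by omega : i ≠ e - 1),
            pv_get_foldl_ne _ _ _ i (fun k hk => by rw [PySem.List.mem_pyRange_one] at hk; omega),
            PySem.Dict.get?_insert_self]
          -- split the rest of the segment at e-1
          have hm2 : e.toNat - i.toNat - 1 = (e.toNat - 1 - (i.toNat + 1)) + 1 := by omega
          have hdd2 : (messages.drop (i.toNat + 1)).drop (e.toNat - 1 - (i.toNat + 1)) =
              messages.drop (e.toNat - 1) := by
            rw [List.drop_drop]; congr 1; omega
          have hseg2 : (messages.drop (i.toNat + 1)).take (e.toNat - i.toNat - 1) =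
              (messages.drop (i.toNat + 1)).take (e.toNat - 1 - (i.toNat + 1)) ++
                (messages.drop (e.toNat - 1)).take 1 := by
            rw [hm2, List.take_add, hdd2]
          rw [hseg2, pv_sweep_append]
          have hlenmid : ((messages.drop (i.toNat + 1)).take (e.toNat - 1 - (i.toNat + 1))).length =
              e.toNat - 1 - (i.toNat + 1) := by
            rw [List.length_take, List.length_drop]; omega
          rw [hlenmid]
          have hmid : pvSweepGo acts
              ((messages.drop (i.toNat + 1)).take (e.toNat - 1 - (i.toNat + 1))) (i + 1) = [] := by
            apply pv_sweep_drops
            intro k hk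
            rw [hlenmid] at hk
            refine ⟨d, ?_⟩
            rw [hlow (i + 1 + k) (by omega), hacc',
              PySem.Dict.get?_insert_of_ne _ _ (by omega : i + 1 + (k : Int) ≠ e - 1),
              pv_get_foldl_mem (PySem.List.pyRange (i + 1) (e - 1) 1) _ _ (i + 1 + (k : Int))
                (PySem.List.nodup_pyRange_one _ _)
                (by rw [PySem.List.mem_pyRange_one]; omega)]
          rw [hmid]
          have hlast : (messages.drop (e.toNat - 1)).take 1 = [messages[(e-1).toNat]'(by omega)] := by
            rw [List.drop_eq_getElem_cons (by omega : e.toNat - 1 < messages.length),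
              List.take_succ_cons, List.take_zero]
            congr 2
            omega
          have he1 : i + 1 + ((e.toNat - 1 - (i.toNat + 1) : Nat) : Int) = e - 1 := by omega
          rw [hlast, he1, pvSweepGo, pvSweepGo, pvEmit,
            hlow (e - 1) (by omega), hacc', PySem.Dict.get?_insert_self]
          simp [List.append_assoc]
        · -- short loop: modified first plus fresh copies of the whole slice
          rw [if_neg h2, if_neg h2]
          set acc' := acc.insert i (PvAct.firstSelf d) with hacc'
          have hacc'inv : ∀ j : Int, e ≤ j → acc'.get? j = none := by
            intro j hj
            rw [hacc', PySem.Dict.get?_insert_of_ne _ _ (by omega : j ≠ i)]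
            exact hacc j (by omega)
          have hIH : ∀ o, aLoop messages lr fuel e o =
              o ++ pvSweepGo (bMark (messages.length : Int) lr rest e acc')
                (messages.drop e.toNat) e :=
            fun o => ih e o rest acc' (by omega) (by omega) hpwrest hmemrest hcovrest hacc'inv
          rw [hIH]
          set acts := bMark (messages.length : Int) lr rest e acc' with hacts
          have hlow : ∀ j : Int, j < e → acts.get? j = acc'.get? j := fun j hj =>
            pv_bMark_get_low _ lr hP rest e acc' j (by omega) hmemrest (Or.inl hj)
          conv_rhs => rw [hsplit]
          rw [pv_sweep_append, hlenseg]
          have hie' : i + ((e.toNat - i.toNat : Nat) : Int) = e := by omega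
          rw [hie']
          have hm : e.toNat - i.toNat = (e.toNat - i.toNat - 1) + 1 := by omega
          have hseg : (messages.drop i.toNat).take (e.toNat - i.toNat) =
              messages[i.toNat]'(by omega) ::
                (messages.drop (i.toNat + 1)).take (e.toNat - i.toNat - 1) := by
            conv_lhs => rw [hdrop, hm]
            rw [List.take_succ_cons]
          rw [hseg, pvSweepGo, pvEmit,
            hlow i (by omega), hacc', PySem.Dict.get?_insert_self]
          have hcopy : pvSweepGo acts
              ((messages.drop (i.toNat + 1)).take (e.toNat - i.toNat - 1)) (i + 1) =
              (messages.drop (i.toNat + 1)).take (e.toNat - i.toNat - 1) := by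
            apply pv_sweep_copy
            intro k hk
            rw [List.length_take, List.length_drop] at hk
            rw [hlow (i + 1 + k) (by omega), hacc',
              PySem.Dict.get?_insert_of_ne _ _ (by omega : i + 1 + (k : Int) ≠ i)]
            exact hacc _ (by omega)
          rw [hcopy]
          have hslice : PySem.List.slice messages (some i) (some e) =
              messages[i.toNat]'(by omega) ::
                (messages.drop (i.toNat + 1)).take (e.toNat - i.toNat - 1) := by
            rw [PySem.List.slice_toNat messages h0 (by omega), ← hseg]
          rw [hslice]
          simp [List.append_assoc]
    · rw [if_neg hi, List.drop_eq_nil_of_le (by omega), pvSweepGo, List.append_nil]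

-- ===== VERDICT (by name: the statement is the Claim_ definition above) =====
theorem collapse_retry_loops_spec : Claim_equal_collapse_retry_loops := by
  intro messages loops _ hpre
  unfold Spec_collapse_retry_loops collapse_retry_loops collapse_retry_loops_alt
  by_cases hl : loops.isEmpty
  · rw [if_pos hl, if_pos hl]
  · rw [if_neg hl, if_neg hl]
    have hP : ∀ s e d, (pvRanges loops).get? s = some (e, d) → 0 ≤ s →
        s < (messages.length : Int) → s < e ∧ e ≤ (messages.length : Int) := by
      intro s e d h hs0 hslen
      rcases pv_get_foldl_insert loops PySem.Dict.empty s (e, d) h with ⟨t, ht, h1, h2⟩ | h2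
      · have h3 := hpre t ht (by rw [h1]; exact ⟨hs0, hslen⟩)
        have h4 : t.2.1 = e := congrArg Prod.fst h2.symm
        omega
      · simp [PySem.Dict.get?, PySem.Dict.empty] at h2
    have hnd : (pvRanges loops).keys.Nodup :=
      PySem.Dict.nodup_keys_foldl_insert_key loops (fun t => t.1)
        (fun d t => (t.2.1, t.2.2)) PySem.Dict.empty PySem.Dict.nodup_keys_empty
    have hks := PySem.List.sorted_perm (pvRanges loops).keys (fun k => k) false
    have hndks : (PySem.List.sorted (pvRanges loops).keys (fun k => k)).Nodup :=
      (hks.nodup_iff).mpr hnd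
    have hle : (PySem.List.sorted (pvRanges loops).keys (fun k => k)).Pairwise (· ≤ ·) :=
      PySem.List.sorted_pairwise (pvRanges loops).keys (fun k => k)
    have hpw : (PySem.List.sorted (pvRanges loops).keys (fun k => k)).Pairwise (· < ·) :=
      (hle.and hndks).imp (fun h => lt_of_le_of_ne h.1 h.2)
    have hmem : ∀ s ∈ PySem.List.sorted (pvRanges loops).keys (fun k => k),
        ((pvRanges loops).get? s).isSome := by
      intro s hs
      rw [PySem.List.mem_sorted] at hs
      rw [← PySem.Dict.contains_eq_isSome_get?]
      exact (PySem.Dict.contains_iff_mem_keys _ _).mpr hs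
    have hcov : ∀ s : Int, ((pvRanges loops).get? s).isSome → (0:Int) ≤ s →
        s ∈ PySem.List.sorted (pvRanges loops).keys (fun k => k) := by
      intro s h1 _
      rw [PySem.List.mem_sorted]
      rw [← PySem.Dict.contains_eq_isSome_get?] at h1
      exact (PySem.Dict.contains_iff_mem_keys _ _).mp h1
    have hfuel : messages.length ≤ (loops.length + 1) * (messages.length + 2147483650) :=
      le_trans (Nat.le_add_right _ _) (Nat.le_mul_of_pos_left _ (by omega))
    rw [pv_enum_flatMap]
    have := pv_main messages (pvRanges loops) hP
      ((loops.length + 1) * (messages.length + 2147483650)) 0 []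
      (PySem.List.sorted (pvRanges loops).keys (fun k => k)) PySem.Dict.empty
      le_rfl (by simpa using (Int.ofNat_le.mpr hfuel)) hpw hmem
      (fun s h1 h2 => hcov s h1 h2)
      (fun j _ => by simp [PySem.Dict.get?, PySem.Dict.empty])
    simpa using this
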